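-- pv_equiv track=rewrite | github.com/sy-tencho/algorithms_specialization | part2/week3/median_maintenance.py | bubble_up_max
-- ===== SOURCE A (Python) =====
-- def bubble_up_max(q, i):
--     p_idx = i // 2
--
--     c = q[i]
--     p = q[p_idx]
--
--     if i == 1 or c < p:
--         return q
--
--     q[i], q[p_idx] = q[p_idx], q[i]
--     return bubble_up_max(q, p_idx)
-- ===== SOURCE B (Python) =====
-- # Hole-based (Floyd-style) sift-up: the value climbs while parents shift down;
-- # one write per level plus a final placement, instead of swap-and-recurse.
-- # Mutates q in place exactly like A does (same final array, same return object).
-- def bubble_up_max(q, i):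
--     v = q[i]
--     while i != 1 and q[i // 2] <= v:
--         q[i] = q[i // 2]
--         i //= 2
--     q[i] = v
--     return q
-- ===== Notes on version B (the rewrite author's own statement) =====
-- stated objective: alternative
-- what changed: Swap-and-recurse sift-up replaced by the hole-based (Floyd-style) iterative sift-up: the climbing value is read once, parents are shifted down with one write per level, and the value is written once at its final slot.
-- outside the precondition, e.g. on bubble_up_max([1, 2], -2): A returns [1, 2], B returns [1, 2]; on bubble_up_max([2, 1, 3], -3): A returns [1, 2, 3], B returns [1, 2, 3]
import Mathlib
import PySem

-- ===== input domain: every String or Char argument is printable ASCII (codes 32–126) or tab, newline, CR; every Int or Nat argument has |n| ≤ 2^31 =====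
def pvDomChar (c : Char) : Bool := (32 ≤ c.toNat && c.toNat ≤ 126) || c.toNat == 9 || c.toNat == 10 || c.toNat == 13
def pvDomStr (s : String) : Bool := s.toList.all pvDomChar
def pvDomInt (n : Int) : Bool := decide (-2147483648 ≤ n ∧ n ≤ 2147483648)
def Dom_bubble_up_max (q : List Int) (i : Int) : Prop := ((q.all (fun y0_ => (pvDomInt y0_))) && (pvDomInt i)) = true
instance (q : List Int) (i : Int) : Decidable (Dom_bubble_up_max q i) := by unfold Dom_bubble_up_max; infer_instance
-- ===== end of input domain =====

-- B replaces the swap-and-recurse sift-up by the hole-based iterative sift-up (one write per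
-- level, value placed once at the end); both Pythons mutate q in place identically, the
-- equivalence proved is about the returned list.

-- ===== PORT A =====
-- literal transliteration of A; the `1 < i` dite is only a totality guard for the i ≤ 0
-- inputs Pre_ excludes, and the `none` arms mark Python's IndexError.
def bubble_up_max (q : List Int) (i : Int) : List Int :=
  let p_idx := PySem.Int.floordiv i 2
  match PySem.List.pyGet? q i, PySem.List.pyGet? q p_idx with
  | some c, some p =>
    if i = 1 ∨ c < p then q
    else if _h : 1 < i then
      bubble_up_max (PySem.List.pySetD (PySem.List.pySetD q i p) p_idx c) p_idx
    else q
  | _, _ => q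
termination_by i.toNat
decreasing_by
  simp only [PySem.Int.floordiv_eq_ediv_of_pos (by omega : (0:Int) < 2)]
  omega

-- ===== PORT B =====
-- B's while-loop over the climbing index; the loop test `i != 1` is written `1 < i` so the
-- recursion is total (the index stays ≥ 1 on every admitted input, where they coincide);
-- the `none` arm marks Python's IndexError reading q[i // 2].
def siftUpHole (q : List Int) (i : Nat) (v : Int) : List Int :=
  match q[i / 2]? with
  | some p =>
    if h : 1 < i ∧ p ≤ v then siftUpHole (q.set i p) (i / 2) v
    else q.set i v
  | none => q.set i v
termination_by i
decreasing_by omega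

def bubble_up_max_alt (q : List Int) (i : Int) : List Int :=
  match PySem.List.pyGet? q i with
  | some v => if 0 ≤ i then siftUpHole q i.toNat v else q  -- i < 0 is outside Pre_
  | none => q

-- ===== PRECONDITION & SPEC =====
-- Pre_ excludes i ≥ len(q) (A raises IndexError) and i ≤ 0, where Python's negative-index
-- wraparound makes A's behaviour accidental: the recursion reaches index -1 or 0 and loops
-- forever (RecursionError) unless some wrapped comparison happens to return early.
def Pre_bubble_up_max (q : List Int) (i : Int) : Prop := 1 ≤ i ∧ i < q.length
instance (q : List Int) (i : Int) : Decidable (Pre_bubble_up_max q i) := by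
  unfold Pre_bubble_up_max; infer_instance
def pvWitness_bubble_up_max : List Int × Int := ([5, 10], 1)
def Spec_bubble_up_max (q : List Int) (i : Int) (out : List Int) : Prop := out = bubble_up_max_alt q i
instance (q : List Int) (i : Int) (out : List Int) : Decidable (Spec_bubble_up_max q i out) := by unfold Spec_bubble_up_max; infer_instance

-- ===== CLAIM (what is proved, stated in full; the proofs are below) =====
def Claim_equal_bubble_up_max : Prop := ∀ (q : List Int) (i : Int), Dom_bubble_up_max q i → Pre_bubble_up_max q i → Spec_bubble_up_max q i (bubble_up_max q i)

-- ===== LEMMAS AND PROOFS =====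

-- siftUpHole never reads position i before overwriting it, so the value stored there is irrelevant
theorem siftUpHole_set_self (q : List Int) (i : Nat) (x v : Int) :
    siftUpHole (q.set i x) i v = siftUpHole q i v := by
  rw [siftUpHole, siftUpHole]
  by_cases hi : 1 < i
  · rw [List.getElem?_set_ne (show i ≠ i / 2 by omega)]
    cases q[i / 2]? with
    | none => simp [List.set_set]
    | some p =>
      simp only
      split_ifs with h
      · rw [List.set_set]
      · rw [List.set_set]
  · cases (q.set i x)[i / 2]? with
    | none =>
      cases q[i / 2]? with
      | none => dsimp only; rw [List.set_set]
      | some p =>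
        dsimp only
        rw [dif_neg (fun h : 1 < i ∧ p ≤ v => hi h.1), List.set_set]
    | some p' =>
      dsimp only
      rw [dif_neg (fun h : 1 < i ∧ p' ≤ v => hi h.1)]
      cases q[i / 2]? with
      | none => dsimp only; rw [List.set_set]
      | some p =>
        dsimp only
        rw [dif_neg (fun h : 1 < i ∧ p ≤ v => hi h.1), List.set_set]

theorem key (n : Nat) : ∀ (q : List Int), 1 ≤ n → n < q.length →
    bubble_up_max q (n : Int) = siftUpHole q n (q.getD n 0) := by
  induction n using Nat.strong_induction_on with
  | _ n ih =>
    intro q h1 h2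
    have hhalf : n / 2 < q.length := by omega
    rw [bubble_up_max, siftUpHole]
    have hfd : PySem.Int.floordiv (n : Int) 2 = ((n / 2 : Nat) : Int) := by
      exact_mod_cast PySem.Int.floordiv_natCast n 2
    simp only [hfd, PySem.List.pyGet?_natCast,
      List.getElem?_eq_getElem h2, List.getElem?_eq_getElem hhalf]
    simp only [List.getD_eq_getElem?_getD, List.getElem?_eq_getElem h2, Option.getD_some]
    by_cases hstop : (n : Int) = 1 ∨ q[n] < q[n / 2]
    · rw [if_pos hstop]
      have hnot : ¬ (1 < n ∧ q[n / 2] ≤ q[n]) := by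
        rcases hstop with h | h
        · intro hc; omega
        · intro hc; omega
      rw [dif_neg hnot, List.set_getElem_self]
    · rw [if_neg hstop]
      rw [not_or] at hstop
      have hstop : (n : Int) ≠ 1 ∧ q[n / 2] ≤ q[n] := ⟨hstop.1, le_of_not_gt hstop.2⟩
      have hn2 : 1 < n := by
        rcases Nat.lt_or_ge 1 n with h | h
        · exact h
        · exfalso; exact hstop.1 (by omega)
      rw [dif_pos (show (1 : Int) < (n : Int) by exact_mod_cast hn2),
        dif_pos (show 1 < n ∧ q[n / 2] ≤ q[n] from ⟨hn2, hstop.2⟩)]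
      simp only [PySem.List.pySetD_natCast]
      set q' := (q.set n q[n / 2]).set (n / 2) q[n] with hq'
      have hlen' : n / 2 < q'.length := by simp [hq']; omega
      have hrec := ih (n / 2) (by omega) q' (by omega) hlen'
      rw [hrec]
      have hget : q'.getD (n / 2) 0 = q[n] := by
        rw [List.getD_eq_getElem?_getD, hq',
          List.getElem?_set_self (by simp; omega), Option.getD_some]
      rw [hget, hq', siftUpHole_set_self]

-- ===== VERDICT (by name: the statement is the Claim_ definition above) =====
theorem bubble_up_max_spec : Claim_equal_bubble_up_max := by
  intro q i _ hpre
  unfold Spec_bubble_up_max bubble_up_max_alt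
  obtain ⟨h1, h2⟩ := hpre
  have hn : i = ((i.toNat : Nat) : Int) := by omega
  have hlt : i.toNat < q.length := by omega
  rw [hn]
  simp only [PySem.List.pyGet?_natCast, List.getElem?_eq_getElem hlt, Int.toNat_natCast]
  rw [if_pos (by positivity)]
  have := key i.toNat q (by omega) hlt
  rw [this]
  simp [List.getD_eq_getElem?_getD, List.getElem?_eq_getElem hlt]
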